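-- pv_equiv track=rewrite | github.com/BigT001/promptplay | script_writing_agent/tools/continuity_checker.py | check_scene_transitions
-- ===== SOURCE A (Python) =====
-- def check_scene_transitions(scenes: dict) -> list:
--     """Check for logical scene transitions."""
--     issues = []
--     last_time = None
--     last_location = None
--
--     for act, act_scenes in scenes.items():
--         for scene in act_scenes:
--             current_time = scene.get("time")
--             current_location = scene.get("location")
--
--             # Check time progression
--             if last_time and last_time == "Night" and current_time == "Day":
--                 # This is actually okay, it's a new day
--                 pass
--             elif last_time and last_time == "Day" and current_time == "Night":
--                 # This is okay too
--                 pass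
--             elif last_time and last_time != current_time:
--                 issues.append(f"Unclear time transition in {act} from {last_time} to {current_time}")
--
--             # Check location transitions
--             if last_location and last_location == current_location:
--                 # Might want to suggest a location change for variety
--                 issues.append(f"Repeated location in {act}: {current_location}")
--
--             last_time = current_time
--             last_location = current_location
--
--     return issues
-- ===== SOURCE B (Python) =====
-- def check_scene_transitions(scenes: dict) -> list:
--     """Columnar/staged rewrite: flatten into parallel act/time/location columns,
--     derive the time-issue column from a transition-rule set over consecutive time
--     pairs, derive the location-issue column by run-length grouping of maximal runs
--     of equal consecutive locations, then interleave the two columns in scene order."""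
--     acts, times, locs = [], [], []
--     for act, act_scenes in scenes.items():
--         for scene in act_scenes:
--             acts.append(act)
--             times.append(scene.get("time"))
--             locs.append(scene.get("location"))
--
--     OK = {("Night", "Day"), ("Day", "Night")}
--     tcol = [None]
--     for pt, ct, act in zip(times, times[1:], acts[1:]):
--         bad = pt and pt != ct and (pt, ct) not in OK
--         tcol.append(f"Unclear time transition in {act} from {pt} to {ct}" if bad else None)
--
--     groups = []          # maximal runs of equal consecutive locations: [loc, [acts]]
--     cur = None
--     for loc, act in zip(locs, acts):
--         if cur is not None and cur[0] == loc:
--             cur[1].append(act)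
--         else:
--             if cur is not None:
--                 groups.append(cur)
--             cur = [loc, [act]]
--     if cur is not None:
--         groups.append(cur)
--
--     lcol = []
--     for loc, run_acts in groups:
--         lcol.append(None)
--         for act in run_acts[1:]:
--             lcol.append(f"Repeated location in {act}: {loc}" if loc else None)
--
--     return [m for pair in zip(tcol, lcol) for m in pair if m is not None]
-- ===== Notes on version B (the rewrite author's own statement) =====
-- stated objective: alternative
-- what changed: Replaces A's single stateful nested loop (mutable last_time/last_location threaded across scenes) by staged columnar passes: flatten into parallel act/time/location columns, compute a time-issue column via a transition-rule set over consecutive time pairs, compute a location-issue column by run-length grouping into maximal runs of equal consecutive locations (emitting one message per run member after the first), then interleave the two columns in scene order.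
import Mathlib
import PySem

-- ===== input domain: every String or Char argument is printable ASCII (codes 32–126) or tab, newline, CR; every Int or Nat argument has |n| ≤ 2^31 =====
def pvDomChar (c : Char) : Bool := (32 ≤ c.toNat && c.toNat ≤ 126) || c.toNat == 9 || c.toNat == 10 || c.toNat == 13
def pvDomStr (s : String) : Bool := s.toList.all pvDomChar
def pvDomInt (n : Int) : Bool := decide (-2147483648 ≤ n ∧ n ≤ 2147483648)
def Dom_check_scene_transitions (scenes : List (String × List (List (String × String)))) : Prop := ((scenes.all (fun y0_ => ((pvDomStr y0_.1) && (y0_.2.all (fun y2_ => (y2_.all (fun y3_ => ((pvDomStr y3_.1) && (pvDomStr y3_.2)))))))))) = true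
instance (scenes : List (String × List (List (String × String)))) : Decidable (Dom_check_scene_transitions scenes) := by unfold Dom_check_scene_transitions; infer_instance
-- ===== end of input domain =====

-- B replaces A's single stateful nested loop by staged columnar passes (flatten to
-- act/time/location columns; a time-issue column from a transition-rule set over
-- consecutive time pairs; a location-issue column by run-length grouping of equal
-- consecutive locations; interleave the columns). Objective: alternative, same cost.

-- ===== PORT A =====
-- f-string rendering of an Optional[str]: None prints as "None"
def pvShowOpt (o : Option String) : String :=
  match o with | some s => s | none => "None"

-- Python truthiness of an Optional[str]
def pvTruthy (o : Option String) : Bool :=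
  match o with | none => false | some s => s ≠ ""

-- one iteration of A's inner loop body over state (issues, last_time, last_location)
def aStep (st : List String × Option String × Option String) (act : String)
    (scene : List (String × String)) : List String × Option String × Option String :=
  let current_time := scene.lookup "time"
  let current_location := scene.lookup "location"
  let issues :=
    if pvTruthy st.2.1 && (st.2.1 == some "Night") && (current_time == some "Day") then st.1
    else if pvTruthy st.2.1 && (st.2.1 == some "Day") && (current_time == some "Night") then st.1
    else if pvTruthy st.2.1 && !(st.2.1 == current_time) then
      st.1 ++ ["Unclear time transition in " ++ act ++ " from " ++ pvShowOpt st.2.1 ++ " to " ++ pvShowOpt current_time]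
    else st.1
  let issues :=
    if pvTruthy st.2.2 && (st.2.2 == current_location) then
      issues ++ ["Repeated location in " ++ act ++ ": " ++ pvShowOpt current_location]
    else issues
  (issues, current_time, current_location)

def check_scene_transitions (scenes : List (String × List (List (String × String)))) : List String :=
  (scenes.foldl (fun st p => p.2.foldl (fun st sc => aStep st p.1 sc) st) ([], none, none)).1

-- ===== PORT B =====
-- stage 1: flatten into parallel columns (acts, times, locations), appending per scene
def bCols (scenes : List (String × List (List (String × String)))) :
    List String × List (Option String) × List (Option String) :=
  scenes.foldl (fun cols p => p.2.foldl (fun cols sc =>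
      (cols.1 ++ [p.1], cols.2.1 ++ [sc.lookup "time"], cols.2.2 ++ [sc.lookup "location"])) cols)
    ([], [], [])

-- stage 2: the entry appended per (pt, ct, act) triple ('bad' guard with the OK set)
def bTimeEntry (pt ct : Option String) (act : String) : Option String :=
  if pvTruthy pt && !(pt == ct) &&
      !((pt == some "Night" && ct == some "Day") || (pt == some "Day" && ct == some "Night")) then
    some ("Unclear time transition in " ++ act ++ " from " ++ pvShowOpt pt ++ " to " ++ pvShowOpt ct)
  else none

def bTcol (times : List (Option String)) (acts : List String) : List (Option String) :=
  (times.zip ((times.tail).zip (acts.tail))).foldl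
    (fun tcol q => tcol ++ [bTimeEntry q.1 q.2.1 q.2.2]) [none]

-- stage 3a: run-length grouping; state = (finished groups, current run)
def bGroupStep (st : List (Option String × List String) × Option (Option String × List String))
    (p : Option String × String) :
    List (Option String × List String) × Option (Option String × List String) :=
  match st.2 with
  | some cur =>
      if cur.1 == p.1 then (st.1, some (cur.1, cur.2 ++ [p.2]))
      else (st.1 ++ [cur], some (p.1, [p.2]))
  | none => (st.1, some (p.1, [p.2]))

def bFinish (st : List (Option String × List String) × Option (Option String × List String)) :
    List (Option String × List String) :=
  match st.2 with | some cur => st.1 ++ [cur] | none => st.1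

def bGroups (locs : List (Option String)) (acts : List String) :
    List (Option String × List String) :=
  bFinish ((locs.zip acts).foldl bGroupStep ([], none))

-- stage 3b: expand each run into its column entries (None for the first member,
-- a repeated-location message — or None if the run value is falsy — for the rest)
def bLocEntry (loc : Option String) (act : String) : Option String :=
  if pvTruthy loc then some ("Repeated location in " ++ act ++ ": " ++ pvShowOpt loc) else none

def bLcol (groups : List (Option String × List String)) : List (Option String) :=
  groups.foldl (fun lcol g =>
    (lcol ++ [none]) ++ (g.2.tail).foldl (fun l act => l ++ [bLocEntry g.1 act]) []) []

-- stage 4: interleave the two columns, dropping the Nones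
def check_scene_transitions_alt (scenes : List (String × List (List (String × String)))) : List String :=
  let cols := bCols scenes
  let tcol := bTcol cols.2.1 cols.1
  let lcol := bLcol (bGroups cols.2.2 cols.1)
  (tcol.zip lcol).flatMap (fun q => q.1.toList ++ q.2.toList)

-- ===== PRECONDITION & SPEC =====
def Spec_check_scene_transitions (scenes : List (String × List (List (String × String)))) (out : List String) : Prop := out = check_scene_transitions_alt scenes
instance (scenes : List (String × List (List (String × String)))) (out : List String) : Decidable (Spec_check_scene_transitions scenes out) := by unfold Spec_check_scene_transitions; infer_instance

-- ===== CLAIM (what is proved, stated in full; the proofs are below) =====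
def Claim_equal_check_scene_transitions : Prop := ∀ (scenes : List (String × List (List (String × String)))), Dom_check_scene_transitions scenes → Spec_check_scene_transitions scenes (check_scene_transitions scenes)

-- ===== LEMMAS AND PROOFS =====

-- the flattened (act, scene) stream both sides traverse
def pvFlat (scenes : List (String × List (List (String × String)))) :
    List (String × List (String × String)) :=
  scenes.flatMap (fun p => p.2.map (fun sc => (p.1, sc)))

def pvAct (q : String × List (String × String)) : String := q.1
def pvTime (q : String × List (String × String)) : Option String := q.2.lookup "time"
def pvLoc (q : String × List (String × String)) : Option String := q.2.lookup "location"

-- A's location check for one scene, as an optional message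
def bLocEntry' (pl cl : Option String) (act : String) : Option String :=
  if pvTruthy pl && (pl == cl) then
    some ("Repeated location in " ++ act ++ ": " ++ pvShowOpt cl)
  else none

-- messages A emits for one scene given previous time/location t, l
def emitTL (t l : Option String) (act : String) (sc : List (String × String)) : List String :=
  (bTimeEntry t (sc.lookup "time") act).toList ++ (bLocEntry' l (sc.lookup "location") act).toList

-- A's elif-chain for the time check collapses to the single guarded entry
theorem chain_eq (t ct : Option String) (act : String) (x : List String) :
    (if pvTruthy t && (t == some "Night") && (ct == some "Day") then x
     else if pvTruthy t && (t == some "Day") && (ct == some "Night") then x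
     else if pvTruthy t && !(t == ct) then
       x ++ ["Unclear time transition in " ++ act ++ " from " ++ pvShowOpt t ++ " to " ++ pvShowOpt ct]
     else x)
    = x ++ (bTimeEntry t ct act).toList := by
  unfold bTimeEntry; split_ifs <;> simp_all

theorem aStep_eq (st : List String × Option String × Option String) (act : String)
    (sc : List (String × String)) :
    aStep st act sc = (st.1 ++ emitTL st.2.1 st.2.2 act sc, sc.lookup "time", sc.lookup "location") := by
  obtain ⟨is, t, l⟩ := st
  simp only [aStep, emitTL]
  rw [chain_eq]
  unfold bLocEntry'
  by_cases h : (pvTruthy l && (l == sc.lookup "location")) = true <;>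
    simp [h, List.append_assoc]

-- A's nested fold over acts = fold over the flattened list
theorem fold_flatten (scenes : List (String × List (List (String × String))))
    (st : List String × Option String × Option String) :
    scenes.foldl (fun st p => p.2.foldl (fun st sc => aStep st p.1 sc) st) st
      = (pvFlat scenes).foldl (fun st q => aStep st q.1 q.2) st := by
  induction scenes generalizing st with
  | nil => rfl
  | cons p rest ih =>
      simp only [pvFlat, List.foldl_cons, List.flatMap_cons, List.foldl_append, ih, List.foldl_map]

-- the pairwise emissions of the flattened list
def pairsA (flat : List (String × List (String × String))) : List String :=
  (flat.zip flat.tail).flatMap (fun q => emitTL (pvTime q.1) (pvLoc q.1) q.2.1 q.2.2)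

def headE (t l : Option String) (flat : List (String × List (String × String))) : List String :=
  match flat with | [] => [] | c :: _ => emitTL t l c.1 c.2

theorem fold_pairs (flat : List (String × List (String × String)))
    (is : List String) (t l : Option String) :
    (flat.foldl (fun st q => aStep st q.1 q.2) (is, t, l)).1
      = is ++ headE t l flat ++ pairsA flat := by
  induction flat generalizing is t l with
  | nil => simp [pairsA, headE]
  | cons c rest ih =>
      rw [List.foldl_cons, aStep_eq, ih]
      cases rest with
      | nil => simp [pairsA, headE]
      | cons d rest' =>
          simp [pairsA, headE, pvTime, pvLoc, List.zip_cons_cons, List.append_assoc]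

theorem emitTL_none_none (act : String) (sc : List (String × String)) :
    emitTL none none act sc = [] := by
  simp [emitTL, bTimeEntry, bLocEntry', pvTruthy]

theorem headE_none_none (flat : List (String × List (String × String))) :
    headE none none flat = [] := by
  cases flat <;> simp [headE, emitTL_none_none]

-- A, characterised
theorem a_char (scenes : List (String × List (List (String × String)))) :
    check_scene_transitions scenes = pairsA (pvFlat scenes) := by
  unfold check_scene_transitions
  rw [fold_flatten, fold_pairs, headE_none_none]
  simp

-- ===== B-side lemmas =====

-- generic: a fold appending one image per element is an append of a map
theorem foldl_append_map {α β : Type} (xs : List α) (a : List β) (f : α → β) :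
    xs.foldl (fun acc x => acc ++ [f x]) a = a ++ xs.map f := by
  induction xs generalizing a with
  | nil => simp
  | cons x xs ih => simp [ih]

-- stage 1 characterised: the columns are maps over the flattened stream
theorem bCols_flatten (scenes : List (String × List (List (String × String))))
    (cols : List String × List (Option String) × List (Option String)) :
    scenes.foldl (fun cols p => p.2.foldl (fun cols sc =>
        (cols.1 ++ [p.1], cols.2.1 ++ [sc.lookup "time"], cols.2.2 ++ [sc.lookup "location"])) cols) cols
      = (pvFlat scenes).foldl (fun cols q =>
        (cols.1 ++ [q.1], cols.2.1 ++ [q.2.lookup "time"], cols.2.2 ++ [q.2.lookup "location"])) cols := by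
  induction scenes generalizing cols with
  | nil => rfl
  | cons p rest ih =>
      simp only [pvFlat, List.foldl_cons, List.flatMap_cons, List.foldl_append, ih, List.foldl_map]

theorem colsfold (flat : List (String × List (String × String)))
    (a : List String) (b c : List (Option String)) :
    flat.foldl (fun cols q =>
        (cols.1 ++ [q.1], cols.2.1 ++ [q.2.lookup "time"], cols.2.2 ++ [q.2.lookup "location"])) (a, b, c)
      = (a ++ flat.map pvAct, b ++ flat.map pvTime, c ++ flat.map pvLoc) := by
  induction flat generalizing a b c with
  | nil => simp
  | cons q rest ih => simp [ih, pvAct, pvTime, pvLoc]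

theorem bCols_eq (scenes : List (String × List (List (String × String)))) :
    bCols scenes = ((pvFlat scenes).map pvAct, (pvFlat scenes).map pvTime, (pvFlat scenes).map pvLoc) := by
  unfold bCols
  rw [bCols_flatten, colsfold]
  simp

-- the triple zip of columns is a map over consecutive pairs of the stream
theorem zip3cols {α β γ : Type} (f : α → β) (g : α → γ) (xs : List α) (x : α) :
    (f x :: xs.map f).zip ((xs.map f).zip (xs.map g))
      = ((x :: xs).zip xs).map (fun q => (f q.1, f q.2, g q.2)) := by
  induction xs generalizing x with
  | nil => rfl
  | cons y ys ih => simp [List.zip_cons_cons, ih]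

-- stage 2 characterised
theorem bTcol_eq (flat : List (String × List (String × String))) :
    bTcol (flat.map pvTime) (flat.map pvAct)
      = none :: (flat.zip flat.tail).map (fun q => bTimeEntry (pvTime q.1) (pvTime q.2) (pvAct q.2)) := by
  cases flat with
  | nil => rfl
  | cons c fs =>
      unfold bTcol
      simp only [List.map_cons, List.tail_cons]
      rw [zip3cols pvTime pvAct fs c, foldl_append_map, List.map_map]
      rfl

-- stage 3 characterised: the per-run expansion of the grouping is the pairwise column
def runEmit (g : Option String × List String) : List (Option String) :=
  none :: g.2.tail.map (bLocEntry g.1)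

theorem bLcol_aux (gs : List (Option String × List String)) (a : List (Option String)) :
    gs.foldl (fun lcol g =>
        (lcol ++ [none]) ++ (g.2.tail).foldl (fun l act => l ++ [bLocEntry g.1 act]) []) a
      = a ++ gs.flatMap runEmit := by
  induction gs generalizing a with
  | nil => simp
  | cons g rest ih =>
      rw [List.foldl_cons, ih, foldl_append_map]
      simp [runEmit]

theorem bLcol_eq (gs : List (Option String × List String)) :
    bLcol gs = gs.flatMap runEmit := by
  unfold bLcol
  rw [bLcol_aux]
  simp

def pairCol (prev : Option String) : List (Option String × String) → List (Option String)
  | [] => []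
  | z :: rest => bLocEntry' prev z.1 z.2 :: pairCol z.1 rest

theorem groupG (zs : List (Option String × String))
    (gs : List (Option String × List String)) (v : Option String) (b : String) (bs : List String) :
    (bFinish (zs.foldl bGroupStep (gs, some (v, b :: bs)))).flatMap runEmit
      = gs.flatMap runEmit ++ runEmit (v, b :: bs) ++ pairCol v zs := by
  induction zs generalizing gs v b bs with
  | nil => simp [bFinish, pairCol]
  | cons z rest ih =>
      rw [List.foldl_cons]
      by_cases h : (v == z.1) = true
      · have hv : v = z.1 := by simpa using h
        subst hv
        simp only [bGroupStep, h, if_pos]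
        rw [show (b :: bs) ++ [z.2] = b :: (bs ++ [z.2]) by simp, ih]
        simp [runEmit, pairCol, bLocEntry, bLocEntry', List.append_assoc]
      · simp only [bGroupStep, h, if_neg, Bool.false_eq_true, not_false_iff]
        rw [ih]
        have hE : bLocEntry' v z.1 z.2 = none := by
          simp [bLocEntry', Bool.eq_false_iff.mpr h]
        simp [runEmit, pairCol, hE, List.append_assoc]

-- transport pairCol from the zipped columns back to stream pairs
theorem pairCol_map (fs : List (String × List (String × String))) (c : String × List (String × String)) :
    pairCol (pvLoc c) (fs.map (fun q => (pvLoc q, pvAct q)))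
      = ((c :: fs).zip fs).map (fun q => bLocEntry' (pvLoc q.1) (pvLoc q.2) (pvAct q.2)) := by
  induction fs generalizing c with
  | nil => rfl
  | cons y ys ih => simp [pairCol, List.zip_cons_cons, ih]

theorem bLcol_char (flat : List (String × List (String × String))) :
    bLcol (bGroups (flat.map pvLoc) (flat.map pvAct))
      = match flat with
        | [] => []
        | c :: fs => none :: ((c :: fs).zip fs).map (fun q => bLocEntry' (pvLoc q.1) (pvLoc q.2) (pvAct q.2)) := by
  rw [bLcol_eq]
  unfold bGroups
  rw [List.zip_map']
  cases flat with
  | nil => rfl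
  | cons c fs =>
      rw [List.map_cons, List.foldl_cons]
      have h0 : bGroupStep ([], none) (pvLoc c, pvAct c) = ([], some (pvLoc c, [pvAct c])) := rfl
      rw [h0, groupG, pairCol_map]
      simp [runEmit]

-- stage 4: interleaving two optional columns headed by none
theorem interleave_eq {α : Type} (ps : List α) (T L : α → Option String) :
    (((none :: ps.map T).zip (none :: ps.map L)).flatMap
        (fun q => q.1.toList ++ q.2.toList))
      = ps.flatMap (fun p => (T p).toList ++ (L p).toList) := by
  rw [List.zip_cons_cons]
  simp only [List.flatMap_cons, Option.toList_none, List.nil_append]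
  rw [List.zip_map']
  simp [List.flatMap_map]

-- ===== VERDICT (by name: the statement is the Claim_ definition above) =====
theorem check_scene_transitions_spec : Claim_equal_check_scene_transitions := by
  intro scenes _
  unfold Spec_check_scene_transitions
  rw [a_char]
  show pairsA (pvFlat scenes) = check_scene_transitions_alt scenes
  unfold check_scene_transitions_alt
  rw [bCols_eq]
  cases hf : pvFlat scenes with
  | nil => rfl
  | cons c fs =>
      show pairsA (c :: fs)
        = ((bTcol ((c :: fs).map pvTime) ((c :: fs).map pvAct)).zip
             (bLcol (bGroups ((c :: fs).map pvLoc) ((c :: fs).map pvAct)))).flatMap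
            (fun q => q.1.toList ++ q.2.toList)
      rw [bTcol_eq, bLcol_char]
      have ht : (c :: fs).tail = fs := rfl
      rw [ht, interleave_eq]
      simp [pairsA, emitTL, pvTime, pvLoc, pvAct]
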